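-- pv_equiv track=rewrite | github.com/avbormalviya/Python-CodingNinjas | DSA/19. Heap - 2/04. Buy the Ticket.py | buyTicket
-- ===== SOURCE A (Python) =====
-- import queue  # Importing queue for FIFO operations
-- import heapq  # Importing heapq for heap operations (max-heap simulation)
--
-- def buyTicket(priorities, index):
--     """
--     Simulates a ticket-buying system where people with higher priority are served first.
--
--     Parameters:
--     priorities (list): A list of integers representing the priorities of people in the queue.
--     index (int): The index of the person for whom we want to determine the turn.
--
--     Returns:
--     int: The turn at which the person at the given index will be served.
--     """
--     # Step 1: Initialize the queue and max-heap
--     q = queue.Queue()  # Queue to store (priority, original index) of each person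
--     maxHeap = []  # Max-heap (simulated using negative priorities)
--
--     # Fill the queue and max-heap with initial data
--     for i in range(len(priorities)):
--         q.put((priorities[i], i))  # (priority, index)
--         heapq.heappush(maxHeap, -priorities[i])  # Negative priority for max-heap behavior
--
--     count = 0  # Counter to track the number of people served
--
--     # Step 2: Process the queue
--     while not q.empty():
--         person = q.get()  # Get the first person in the queue
--
--         # Check if this person has the highest priority
--         if person[0] == -maxHeap[0]:
--             # Serve the person and remove their priority from the max-heap
--             heapq.heappop(maxHeap)
--             count += 1  # Increment the count of people served
--
--             # If this is the person at the target index, return their turn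
--             if person[1] == index:
--                 return count
--         else:
--             # If this person doesn't have the highest priority, put them back in the queue
--             q.put(person)
--
--     return -1  # Should not reach here unless something goes wrong
-- ===== SOURCE B (Python) =====
-- def buyTicket(priorities, index):
--     # Serve people by circular priority selection: track the position of the last
--     # person served; the next person served is the highest-priority person, picking
--     # the first one circularly after that position. No queue rotation, no heap.
--     remaining = [(p, i) for i, p in enumerate(priorities)]  # (priority, position), ascending positions
--     ptr = -1   # position of the last person served; the queue front is circularly just after it
--     turn = 0
--     while remaining:
--         m = max(e[0] for e in remaining)
--         ahead = [e for e in remaining if e[0] == m and e[1] > ptr]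
--         top = ahead[0] if ahead else next(e for e in remaining if e[0] == m)
--         turn += 1
--         if top[1] == index:
--             return turn
--         remaining = [e for e in remaining if e[1] != top[1]]
--         ptr = top[1]
--     return -1
-- ===== Notes on version B (the rewrite author's own statement) =====
-- stated objective: alternative
-- what changed: A simulates the queue person-by-person with a FIFO queue plus a max-heap, cycling every sub-maximal person to the back one at a time; B keeps no queue or heap at all and instead picks each served person directly by a circular-successor rule (the first highest-priority person whose position follows the last served position, wrapping around).
import Mathlib
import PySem

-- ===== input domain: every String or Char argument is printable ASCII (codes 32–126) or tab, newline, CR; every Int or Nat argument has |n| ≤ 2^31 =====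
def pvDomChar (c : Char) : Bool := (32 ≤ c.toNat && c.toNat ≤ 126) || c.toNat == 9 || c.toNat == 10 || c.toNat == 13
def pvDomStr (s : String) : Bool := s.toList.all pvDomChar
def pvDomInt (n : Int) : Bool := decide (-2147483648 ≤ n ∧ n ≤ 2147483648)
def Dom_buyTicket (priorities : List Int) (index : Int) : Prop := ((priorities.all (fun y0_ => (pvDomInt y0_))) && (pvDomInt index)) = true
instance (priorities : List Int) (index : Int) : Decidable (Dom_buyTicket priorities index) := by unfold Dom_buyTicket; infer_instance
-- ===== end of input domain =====

-- B replaces A's FIFO-rotation + heap simulation by direct circular selection of the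
-- next served person (track the last served position, pick the first highest-priority
-- person circularly after it); one direct selection per served person instead of A's
-- per-person queue rotations (measured faster in a timing run; same O(n^2) bound).

-- ===== PORT A =====
-- heapq on a list of negated priorities, observed only through heap[0]/heappop:
-- modeled exactly as an ascending sorted list (heappush = ordered insert, heappop = tail).
def pvInsSorted (x : Int) : List Int → List Int
  | [] => [x]
  | y :: ys => if x ≤ y then x :: y :: ys else y :: pvInsSorted x ys

-- the while-loop of A; fuel only makes the recursion structural (Python's loop ends
-- exactly at the empty queue; the chosen fuel is proved sufficient below)
def pvALoop (index : Int) : Nat → List (Int × Int) → List Int → Int → Int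
  | 0, _, _, _ => -1
  | _ + 1, [], _, _ => -1
  | fuel + 1, (p, i) :: rest, maxHeap, count =>
    if p = -(maxHeap.headD 0) then
      if i = index then count + 1
      else pvALoop index fuel rest maxHeap.tail (count + 1)
    else pvALoop index fuel (rest ++ [(p, i)]) maxHeap count

def buyTicket (priorities : List Int) (index : Int) : Int :=
  let init := (PySem.List.enumerate priorities).foldl
      (fun (st : List (Int × Int) × List Int) e => (st.1 ++ [(e.2, e.1)], pvInsSorted (-e.2) st.2))
      ([], [])
  pvALoop index ((priorities.length + 1) * (priorities.length + 1)) init.1 init.2 0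

-- ===== PORT B =====
-- the while-loop of B: remaining people as (priority, position), ptr = position of
-- the last person served; fuel (length + 1) only makes the recursion structural
def pvBLoop (index : Int) : Nat → List (Int × Int) → Int → Int → Int
  | 0, _, _, _ => -1
  | _ + 1, [], _, _ => -1
  | fuel + 1, e :: rest, ptr, turn =>
    let rem := e :: rest
    let m := (PySem.List.max? (rem.map (fun x => x.1)) (fun x => x)).getD 0
    let ahead := rem.filter (fun x : Int × Int => x.1 == m && decide (ptr < x.2))
    let top := match ahead with
      | t :: _ => t
      | [] => (rem.filter (fun x : Int × Int => x.1 == m)).headD (0, 0)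
    if top.2 = index then turn + 1
    else pvBLoop index fuel (rem.filter (fun x : Int × Int => x.2 ≠ top.2)) top.2 (turn + 1)

def buyTicket_alt (priorities : List Int) (index : Int) : Int :=
  let remaining := (PySem.List.enumerate priorities).map (fun e => (e.2, e.1))
  pvBLoop index (priorities.length + 1) remaining (-1) 0

-- ===== PRECONDITION & SPEC =====
def Spec_buyTicket (priorities : List Int) (index : Int) (out : Int) : Prop := out = buyTicket_alt priorities index
instance (priorities : List Int) (index : Int) (out : Int) : Decidable (Spec_buyTicket priorities index out) := by unfold Spec_buyTicket; infer_instance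

-- ===== CLAIM (what is proved, stated in full; the proofs are below) =====
def Claim_equal_buyTicket : Prop := ∀ (priorities : List Int) (index : Int), Dom_buyTicket priorities index → Spec_buyTicket priorities index (buyTicket priorities index)

-- ===== LEMMAS AND PROOFS =====

-- A's queue at a serving boundary, expressed from B's state: the people with position
-- after ptr (in order) followed by those with position ≤ ptr (in order).
def pvRot (ptr : Int) (rem : List (Int × Int)) : List (Int × Int) :=
  rem.filter (fun e => decide (ptr < e.2)) ++ rem.filter (fun e => decide (e.2 ≤ ptr))

-- ascending positions
abbrev pvAsc (rem : List (Int × Int)) : Prop := rem.Pairwise (fun a b => a.2 < b.2)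

lemma pvInsSorted_eq (x : Int) (l : List Int) :
    pvInsSorted x l = List.orderedInsert (· ≤ ·) x l := by
  induction l with
  | nil => rfl
  | cons y ys ih => simp [pvInsSorted, List.orderedInsert, ih]

lemma pvALoop_rot (index : Int) (heap : List Int) (count : Int) :
    ∀ (xs q : List (Int × Int)) (f : Nat),
      (∀ x ∈ xs, x.1 ≠ -(heap.headD 0)) →
      pvALoop index (f + xs.length) (xs ++ q) heap count = pvALoop index f (q ++ xs) heap count := by
  intro xs
  induction xs with
  | nil => intro q f _; simp
  | cons x xs ih =>
    intro q f hne
    obtain ⟨p, i⟩ := x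
    have hp : p ≠ -(heap.headD 0) := hne (p, i) (by simp)
    have hfz : f + (List.length ((p,i) :: xs)) = (f + xs.length) + 1 := by simp; omega
    rw [hfz]
    show pvALoop index ((f + xs.length) + 1) ((p, i) :: (xs ++ q)) heap count = _
    rw [pvALoop]
    simp only [if_neg hp]
    have := ih (q ++ [(p, i)]) f (fun x hx => hne x (by simp [hx]))
    simpa [List.append_assoc] using this

lemma pvFilterSplit (c : Int) (p : Int × Int → Bool) :
    ∀ (l : List (Int × Int)), pvAsc l →
      l.filter p = l.filter (fun e => p e && decide (e.2 ≤ c)) ++ l.filter (fun e => p e && decide (c < e.2)) := by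
  intro l
  induction l with
  | nil => intro _; simp
  | cons a l ih =>
    intro hl
    have hl' : pvAsc l := hl.tail
    have ha : ∀ e ∈ l, a.2 < e.2 := fun e he => List.rel_of_pairwise_cons hl he
    by_cases hpa : p a = true
    · by_cases hc : a.2 ≤ c
      · simp [List.filter_cons, hpa, hc, not_lt.2 hc, ih hl']
      · push_neg at hc
        have h1 : l.filter (fun e => p e && decide (e.2 ≤ c)) = [] := by
          rw [List.filter_eq_nil_iff]
          intro e he
          have := ha e he
          simp; intro _; omega
        have h2 : l.filter (fun e => p e && decide (c < e.2)) = l.filter p := by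
          apply List.filter_congr
          intro e he
          have := ha e he
          simp only [Bool.and_eq_left_iff_imp]
          intro _
          simp; omega
        simp [List.filter_cons, hpa, hc, not_le.2 hc, h1, h2]
    · simp only [Bool.not_eq_true] at hpa
      simp [List.filter_cons, hpa, ih hl']

lemma pvFilterSplit3 (s : Int) (p : Int × Int → Bool) :
    ∀ (l : List (Int × Int)) (t : Int × Int), pvAsc l → t ∈ l → t.2 = s → p t = true →
      l.filter p = l.filter (fun e => p e && decide (e.2 < s)) ++ t :: l.filter (fun e => p e && decide (s < e.2)) := by
  intro l
  induction l with
  | nil => intro t _ ht; simp at ht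
  | cons a l ih =>
    intro t hl hmem hts hpt
    have hl' : pvAsc l := hl.tail
    have ha : ∀ e ∈ l, a.2 < e.2 := fun e he => List.rel_of_pairwise_cons hl he
    rcases List.mem_cons.mp hmem with heq | hmem
    · subst heq
      -- a = t : everything in l has key > s
      have h1 : l.filter (fun e => p e && decide (e.2 < s)) = [] := by
        rw [List.filter_eq_nil_iff]; intro e he
        have := ha e he; simp; intro _; omega
      have h2 : l.filter (fun e => p e && decide (s < e.2)) = l.filter p := by
        apply List.filter_congr; intro e he
        have := ha e he
        simp only [Bool.and_eq_left_iff_imp]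
        intro _; simp; omega
      have hns : ¬ (t.2 < s) := by omega
      simp [List.filter_cons, hpt, hns, h1, h2]; omega
    · have hat : a.2 < t.2 := List.rel_of_pairwise_cons hl hmem
      have has : a.2 < s := by omega
      have hnsa : ¬ (s < a.2) := by omega
      by_cases hpa : p a = true
      · simp [List.filter_cons, hpa, has, hnsa, ih t hl' hmem hts hpt]
      · simp only [Bool.not_eq_true] at hpa
        simp [List.filter_cons, hpa, ih t hl' hmem hts hpt]

lemma pvPermFilterNe : ∀ (l : List (Int × Int)) (t : Int × Int), pvAsc l → t ∈ l →
    l.Perm (t :: l.filter (fun e => e.2 ≠ t.2)) := by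
  intro l
  induction l with
  | nil => intro t _ ht; simp at ht
  | cons a l ih =>
    intro t hl hmem
    have ha : ∀ e ∈ l, a.2 < e.2 := fun e he => List.rel_of_pairwise_cons hl he
    rcases List.mem_cons.mp hmem with heq | hmem
    · subst heq
      have hid : l.filter (fun e : Int × Int => !decide (e.2 = t.2)) = l := by
        rw [List.filter_eq_self]; intro e he
        have := ha e he; simp; omega
      simp [List.filter_cons, hid]
    · have hat : a.2 ≠ t.2 := by have := ha t hmem; omega
      have hperm := ih t hl.tail hmem
      have step1 : (a :: l).Perm (a :: t :: l.filter (fun e => e.2 ≠ t.2)) := hperm.cons a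
      have step2 : (a :: t :: l.filter (fun e => e.2 ≠ t.2)).Perm
          (t :: a :: l.filter (fun e => e.2 ≠ t.2)) := List.Perm.swap _ _ _
      have step3 : t :: a :: l.filter (fun e => e.2 ≠ t.2)
          = t :: (a :: l).filter (fun e => e.2 ≠ t.2) := by simp [List.filter_cons, hat]
      exact (step1.trans step2).trans (step3 ▸ List.Perm.refl _)

-- common serving step: rotate the sub-maximal prefix away, serve t, recurse
lemma pvServe (index : Int) (L : Nat)
    (IH : ∀ M, M < L → ∀ (rem : List (Int × Int)) (ptr : Int) (heap : List Int) (count : Int) (fa fb : Nat),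
      rem.length = M → pvAsc rem → heap.Pairwise (· ≤ ·) → heap.Perm (rem.map (fun e => -e.1)) →
      M * M + 1 ≤ fa → M + 1 ≤ fb →
      pvALoop index fa (pvRot ptr rem) heap count = pvBLoop index fb rem ptr count)
    (rem : List (Int × Int)) (ptr : Int) (heap : List Int) (count : Int) (fa' fb' : Nat)
    (hlen : rem.length = L) (hasc : pvAsc rem)
    (hsorted : heap.Pairwise (· ≤ ·)) (hperm : heap.Perm (rem.map (fun e => -e.1)))
    (hfa : L * L + 1 ≤ fa' + 1) (hfb : L + 1 ≤ fb' + 1)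
    (m : Int) (hh : heap.headD 0 = -m)
    (t : Int × Int) (ht_mem : t ∈ rem) (ht1 : t.1 = m)
    (P S : List (Int × Int))
    (hdecomp : pvRot ptr rem = P ++ t :: S)
    (hP : ∀ x ∈ P, x.1 ≠ m)
    (hnewq : S ++ P = pvRot t.2 (rem.filter (fun x : Int × Int => x.2 ≠ t.2))) :
    pvALoop index (fa' + 1) (pvRot ptr rem) heap count =
      (if t.2 = index then count + 1
       else pvBLoop index fb' (rem.filter (fun x : Int × Int => x.2 ≠ t.2)) t.2 (count + 1)) := by
  have hpermt : rem.Perm (t :: rem.filter (fun e => e.2 ≠ t.2)) := pvPermFilterNe rem t hasc ht_mem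
  have hLpos : 1 ≤ L := by rw [← hlen]; exact List.length_pos_of_mem ht_mem
  have hlenrot : (pvRot ptr rem).length = L := by
    rw [← hlen, pvRot, List.length_append]
    have h2 : ∀ x ∈ rem, (decide (x.2 ≤ ptr) : Bool) = !decide (ptr < x.2) := by
      intro x _; by_cases h : ptr < x.2 <;> simp [h] <;> omega
    rw [List.filter_congr h2]
    have := (List.filter_append_perm (fun e : Int × Int => decide (ptr < e.2)) rem).length_eq
    simpa using this
  have hPS : P.length + 1 + S.length = L := by
    have := hlenrot; rw [hdecomp] at this; simp at this; omega
  have hLsq : L ≤ L * L := Nat.le_mul_of_pos_left L hLpos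
  -- rotate P to the back
  have hPne : ∀ x ∈ P, x.1 ≠ -(heap.headD 0) := by
    intro x hx; rw [hh]; simpa using hP x hx
  have hsplit : fa' + 1 = (fa' + 1 - P.length) + P.length := by omega
  rw [hdecomp, hsplit, pvALoop_rot index heap count P (t :: S) _ hPne]
  obtain ⟨f', hf'⟩ : ∃ f', fa' + 1 - P.length = f' + 1 := ⟨fa' - P.length, by omega⟩
  rw [hf']
  obtain ⟨tp, ts⟩ := t
  simp only [List.cons_append]
  rw [pvALoop]
  have hcond : tp = -(heap.headD 0) := by rw [hh]; simp at ht1 ⊢; omega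
  rw [if_pos hcond]
  by_cases hidx : ts = index
  · simp [hidx]
  · rw [if_neg hidx, if_neg hidx]
    simp only at hnewq
    rw [hnewq]
    -- heap is -m followed by the rest
    obtain ⟨h0, hs, rfl⟩ : ∃ h0 hs, heap = h0 :: hs := by
      cases heap with
      | nil =>
        exfalso
        have := hperm.length_eq
        simp at this
        have hre : rem = [] := List.eq_nil_of_length_eq_zero this.symm
        rw [hre] at ht_mem
        simp at ht_mem
      | cons h0 hs => exact ⟨h0, hs, rfl⟩
    have hh0 : h0 = -m := by simpa using hh
    have hpermtail : hs.Perm ((rem.filter (fun e : Int × Int => e.2 ≠ (tp, ts).2)).map (fun e => -e.1)) := by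
      have h1 : (h0 :: hs).Perm (((tp, ts) :: rem.filter (fun e : Int × Int => e.2 ≠ (tp, ts).2)).map (fun e => -e.1)) :=
        hperm.trans (hpermt.map _)
      simp only [List.map_cons] at h1
      have h2 : -(tp, ts).1 = h0 := by simp at ht1 ⊢; omega
      rw [h2] at h1
      exact h1.cons_inv
    have hcons : ((tp, ts) :: rem.filter (fun e : Int × Int => e.2 ≠ (tp, ts).2)).length = L := by
      rw [← hlen]
      exact hpermt.length_eq.symm
    have hlen' : (rem.filter (fun e : Int × Int => e.2 ≠ (tp, ts).2)).length = L - 1 := by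
      simp only [List.length_cons] at hcons
      exact Nat.eq_sub_of_add_eq hcons
    have hsq : (L - 1) * (L - 1) + 1 ≤ f' := by
      obtain ⟨L', rfl⟩ : ∃ L', L = L' + 1 := ⟨L - 1, by omega⟩
      have hexp : (L' + 1) * (L' + 1) = L' * L' + 2 * L' + 1 := by ring
      have hPle : P.length ≤ L' := by omega
      have hgoal : (L' + 1 - 1) * (L' + 1 - 1) = L' * L' := by simp
      omega
    exact IH (L - 1) (by omega)
      (rem.filter (fun e : Int × Int => e.2 ≠ (tp, ts).2)) (tp, ts).2 hs (count + 1) f' fb'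
      hlen' (hasc.filter _) (List.Pairwise.tail (l := h0 :: hs) hsorted) hpermtail hsq (by omega)

-- first case: some highest-priority person sits after ptr; t is the first of them
lemma pvStepCase1 (index : Int) (L : Nat)
    (IH : ∀ M, M < L → ∀ (rem : List (Int × Int)) (ptr : Int) (heap : List Int) (count : Int) (fa fb : Nat),
      rem.length = M → pvAsc rem → heap.Pairwise (· ≤ ·) → heap.Perm (rem.map (fun e => -e.1)) →
      M * M + 1 ≤ fa → M + 1 ≤ fb →
      pvALoop index fa (pvRot ptr rem) heap count = pvBLoop index fb rem ptr count)
    (rem : List (Int × Int)) (ptr : Int) (heap : List Int) (count : Int) (fa' fb' : Nat)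
    (hlen : rem.length = L) (hasc : pvAsc rem)
    (hsorted : heap.Pairwise (· ≤ ·)) (hperm : heap.Perm (rem.map (fun e => -e.1)))
    (hfa : L * L + 1 ≤ fa' + 1) (hfb : L + 1 ≤ fb' + 1)
    (m : Int) (hh : heap.headD 0 = -m)
    (t : Int × Int) (ht_mem : t ∈ rem) (ht1 : t.1 = m) (htptr : ptr < t.2)
    (hamin : ∀ x ∈ rem, x.1 = m → ptr < x.2 → t.2 ≤ x.2) :
    pvALoop index (fa' + 1) (pvRot ptr rem) heap count =
      (if t.2 = index then count + 1
       else pvBLoop index fb' (rem.filter (fun x : Int × Int => x.2 ≠ t.2)) t.2 (count + 1)) := by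
  apply pvServe index L IH rem ptr heap count fa' fb' hlen hasc hsorted hperm hfa hfb m hh
    t ht_mem ht1
    (rem.filter (fun e => decide (ptr < e.2) && decide (e.2 < t.2)))
    (rem.filter (fun e => decide (ptr < e.2) && decide (t.2 < e.2)) ++
      rem.filter (fun e => decide (e.2 ≤ ptr)))
  · -- decomposition of the rotated queue
    rw [pvRot, pvFilterSplit3 t.2 (fun e => decide (ptr < e.2)) rem t hasc ht_mem rfl (by simpa using htptr)]
    simp [List.append_assoc]
  · -- everything before t in the queue has sub-maximal priority
    intro x hx hxm
    have hx' := List.mem_filter.mp hx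
    have hcon : t.2 ≤ x.2 := hamin x hx'.1 hxm (by simpa using (Bool.and_elim_left hx'.2))
    have : x.2 < t.2 := by simpa using (Bool.and_elim_right hx'.2)
    omega
  · -- the queue after serving t is the rotation at t.2 of the rest
    rw [pvRot, List.filter_filter, List.filter_filter]
    have hG1 : rem.filter (fun a => decide (t.2 < a.2) && decide (a.2 ≠ t.2)) =
        rem.filter (fun e => decide (ptr < e.2) && decide (t.2 < e.2)) := by
      apply List.filter_congr
      intro x _
      by_cases h1 : t.2 < x.2 <;> by_cases h2 : ptr < x.2 <;> simp [h1, h2] <;> omega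
    have hG2 : rem.filter (fun a => decide (a.2 ≤ t.2) && decide (a.2 ≠ t.2)) =
        rem.filter (fun e => decide (e.2 ≤ ptr)) ++
          rem.filter (fun e => decide (ptr < e.2) && decide (e.2 < t.2)) := by
      have hg : rem.filter (fun a => decide (a.2 ≤ t.2) && decide (a.2 ≠ t.2)) =
          rem.filter (fun a => decide (a.2 < t.2)) := by
        apply List.filter_congr
        intro x _
        by_cases h1 : x.2 < t.2 <;> simp [h1] <;> omega
      rw [hg, pvFilterSplit ptr (fun a => decide (a.2 < t.2)) rem hasc]
      congr 1
      · apply List.filter_congr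
        intro x _
        by_cases h1 : x.2 ≤ ptr <;> simp [h1] <;> omega
      · apply List.filter_congr
        intro x _
        by_cases h1 : ptr < x.2 <;> by_cases h2 : x.2 < t.2 <;> simp [h1, h2]
    rw [hG1, hG2]
    simp [List.append_assoc]

-- second case: nobody of highest priority after ptr; wrap to the first of the class
lemma pvStepCase2 (index : Int) (L : Nat)
    (IH : ∀ M, M < L → ∀ (rem : List (Int × Int)) (ptr : Int) (heap : List Int) (count : Int) (fa fb : Nat),
      rem.length = M → pvAsc rem → heap.Pairwise (· ≤ ·) → heap.Perm (rem.map (fun e => -e.1)) →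
      M * M + 1 ≤ fa → M + 1 ≤ fb →
      pvALoop index fa (pvRot ptr rem) heap count = pvBLoop index fb rem ptr count)
    (rem : List (Int × Int)) (ptr : Int) (heap : List Int) (count : Int) (fa' fb' : Nat)
    (hlen : rem.length = L) (hasc : pvAsc rem)
    (hsorted : heap.Pairwise (· ≤ ·)) (hperm : heap.Perm (rem.map (fun e => -e.1)))
    (hfa : L * L + 1 ≤ fa' + 1) (hfb : L + 1 ≤ fb' + 1)
    (m : Int) (hh : heap.headD 0 = -m)
    (hnone : ∀ x ∈ rem, x.1 = m → x.2 ≤ ptr)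
    (t : Int × Int) (ht_mem : t ∈ rem) (ht1 : t.1 = m) (htptr : t.2 ≤ ptr)
    (hcmin : ∀ x ∈ rem, x.1 = m → t.2 ≤ x.2) :
    pvALoop index (fa' + 1) (pvRot ptr rem) heap count =
      (if t.2 = index then count + 1
       else pvBLoop index fb' (rem.filter (fun x : Int × Int => x.2 ≠ t.2)) t.2 (count + 1)) := by
  apply pvServe index L IH rem ptr heap count fa' fb' hlen hasc hsorted hperm hfa hfb m hh
    t ht_mem ht1
    (rem.filter (fun e => decide (ptr < e.2)) ++ rem.filter (fun e => decide (e.2 < t.2)))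
    (rem.filter (fun e => decide (e.2 ≤ ptr) && decide (t.2 < e.2)))
  · rw [pvRot, pvFilterSplit3 t.2 (fun e => decide (e.2 ≤ ptr)) rem t hasc ht_mem rfl (by simpa using htptr)]
    have hg : rem.filter (fun e => decide (e.2 ≤ ptr) && decide (e.2 < t.2)) =
        rem.filter (fun e => decide (e.2 < t.2)) := by
      apply List.filter_congr
      intro x _
      by_cases h1 : x.2 < t.2 <;> simp [h1] <;> omega
    rw [hg]
    simp [List.append_assoc]
  · intro x hx hxm
    rcases List.mem_append.mp hx with hx | hx
    · have hx' := List.mem_filter.mp hx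
      have := hnone x hx'.1 hxm
      have : ptr < x.2 := by simpa using hx'.2
      omega
    · have hx' := List.mem_filter.mp hx
      have := hcmin x hx'.1 hxm
      have : x.2 < t.2 := by simpa using hx'.2
      omega
  · rw [pvRot, List.filter_filter, List.filter_filter]
    have hG1 : rem.filter (fun a => decide (t.2 < a.2) && decide (a.2 ≠ t.2)) =
        rem.filter (fun e => decide (e.2 ≤ ptr) && decide (t.2 < e.2)) ++
          rem.filter (fun e => decide (ptr < e.2)) := by
      have hg : rem.filter (fun a => decide (t.2 < a.2) && decide (a.2 ≠ t.2)) =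
          rem.filter (fun a => decide (t.2 < a.2)) := by
        apply List.filter_congr
        intro x _
        by_cases h1 : t.2 < x.2 <;> simp [h1] <;> omega
      rw [hg, pvFilterSplit ptr (fun a => decide (t.2 < a.2)) rem hasc]
      congr 1
      · apply List.filter_congr
        intro x _
        by_cases h1 : x.2 ≤ ptr <;> by_cases h2 : t.2 < x.2 <;> simp [h1, h2]
      · apply List.filter_congr
        intro x _
        by_cases h1 : ptr < x.2 <;> simp [h1] <;> omega
    have hG2 : rem.filter (fun a => decide (a.2 ≤ t.2) && decide (a.2 ≠ t.2)) =
        rem.filter (fun e => decide (e.2 < t.2)) := by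
      apply List.filter_congr
      intro x _
      by_cases h1 : x.2 < t.2 <;> simp [h1] <;> omega
    rw [hG1, hG2]
    simp [List.append_assoc]

-- the maximum priority is the negated heap head
lemma pvHeapHead (rem : List (Int × Int)) (heap : List Int) (m : Int)
    (_hne : rem ≠ []) (hsorted : heap.Pairwise (· ≤ ·)) (hperm : heap.Perm (rem.map (fun e => -e.1)))
    (hm : PySem.List.max? (rem.map (fun x => x.1)) (fun x => x) = some m) :
    heap.headD 0 = -m := by
  have hmem : m ∈ rem.map (fun x => x.1) := PySem.List.max?_mem hm
  have hmax : ∀ y ∈ rem.map (fun x => x.1), y ≤ m := PySem.List.max?_isMax hm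
  have hnegm : -m ∈ heap := by
    refine hperm.symm.subset ?_
    obtain ⟨e, he, hem⟩ := List.mem_map.mp hmem
    exact List.mem_map.mpr ⟨e, he, by simp [hem]⟩
  match heap, hsorted with
  | h0 :: hs, hsorted =>
    have hle : ∀ y ∈ h0 :: hs, h0 ≤ y := by
      intro y hy
      rcases List.mem_cons.mp hy with rfl | hy
      · exact le_refl _
      · exact List.rel_of_pairwise_cons hsorted hy
    have h1 : h0 ≤ -m := hle _ hnegm
    have h2 : -m ≤ h0 := by
      have : h0 ∈ rem.map (fun e => -e.1) := hperm.subset (by simp)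
      obtain ⟨e, he, hem⟩ := List.mem_map.mp this
      have := hmax e.1 (List.mem_map.mpr ⟨e, he, rfl⟩)
      omega
    simp [le_antisymm h1 h2]

-- main loop correspondence: A's rotating queue from B's (remaining, ptr) state
lemma pvMain (index : Int) :
    ∀ (L : Nat) (rem : List (Int × Int)) (ptr : Int) (heap : List Int) (count : Int) (fa fb : Nat),
      rem.length = L → pvAsc rem →
      heap.Pairwise (· ≤ ·) → heap.Perm (rem.map (fun e => -e.1)) →
      L * L + 1 ≤ fa → L + 1 ≤ fb →
      pvALoop index fa (pvRot ptr rem) heap count = pvBLoop index fb rem ptr count := by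
  intro L
  induction L using Nat.strong_induction_on with
  | _ L IH =>
  intro rem ptr heap count fa fb hlen hasc hsorted hperm hfa hfb
  obtain ⟨fa', rfl⟩ : ∃ fa', fa = fa' + 1 := ⟨fa - 1, by omega⟩
  obtain ⟨fb', rfl⟩ : ∃ fb', fb = fb' + 1 := ⟨fb - 1, by omega⟩
  match rem, hlen with
  | [], hlen =>
    simp [pvRot, pvALoop, pvBLoop]
  | e₀ :: rest₀, hlen =>
  set rem : List (Int × Int) := e₀ :: rest₀ with hrem
  have hLpos : 1 ≤ L := by rw [← hlen]; simp [hrem]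
  -- the maximal priority m
  obtain ⟨m, hm⟩ : ∃ m, PySem.List.max? (rem.map (fun x => x.1)) (fun x => x) = some m := by
    cases h : PySem.List.max? (rem.map (fun x => x.1)) (fun x => x) with
    | none => simp [PySem.List.max?_eq_none_iff] at h
    | some m => exact ⟨m, rfl⟩
  have hmmem : m ∈ rem.map (fun x => x.1) := PySem.List.max?_mem hm
  have hh : heap.headD 0 = -m := pvHeapHead rem heap m (by simp [hrem]) hsorted hperm hm
  -- case analysis following B
  cases hA : rem.filter (fun x : Int × Int => x.1 == m && decide (ptr < x.2)) with
  | cons t atl =>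
    -- there is a highest-priority person after ptr; t is the first
    have htA : t ∈ rem.filter (fun x : Int × Int => x.1 == m && decide (ptr < x.2)) := by
      rw [hA]; simp
    have ht_mem : t ∈ rem := (List.mem_filter.mp htA).1
    have ht1 : t.1 = m := by have := (List.mem_filter.mp htA).2; simp at this; exact this.1
    have htptr : ptr < t.2 := by have := (List.mem_filter.mp htA).2; simp at this; exact this.2
    have hamin : ∀ x ∈ rem, x.1 = m → ptr < x.2 → t.2 ≤ x.2 := by
      intro x hx hx1 hxp
      have hxA : x ∈ rem.filter (fun x : Int × Int => x.1 == m && decide (ptr < x.2)) :=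
        List.mem_filter.mpr ⟨hx, by simp [hx1, hxp]⟩
      rw [hA] at hxA
      rcases List.mem_cons.mp hxA with rfl | hxA
      · exact le_refl _
      · have hpf : List.Pairwise (fun a b : Int × Int => a.2 < b.2) (t :: atl) := by
          rw [← hA]; exact hasc.filter _
        exact le_of_lt (List.rel_of_pairwise_cons hpf hxA)
    have hstep := pvStepCase1 index L IH rem ptr heap count fa' fb' hlen hasc hsorted hperm hfa hfb
      m hh t ht_mem ht1 htptr hamin
    rw [hstep]
    have hgetD : (PySem.List.max? (((e₀ :: rest₀) : List (Int × Int)).map (fun x => x.1)) (fun x => x)).getD 0 = m := by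
      rw [hrem] at hm; rw [hm]; rfl
    rw [hrem] at hA ⊢
    rw [pvBLoop]
    simp only [hgetD, hA]
  | nil =>
    -- nobody of highest priority after ptr: wrap around to the first of the class
    have hnone : ∀ x ∈ rem, x.1 = m → x.2 ≤ ptr := by
      intro x hx hx1
      by_contra hgt
      have : x ∈ rem.filter (fun x : Int × Int => x.1 == m && decide (ptr < x.2)) :=
        List.mem_filter.mpr ⟨hx, by simp [hx1]; omega⟩
      rw [hA] at this; simp at this
    cases hC : rem.filter (fun x : Int × Int => x.1 == m) with
    | nil =>
      exfalso
      obtain ⟨e, he, hem⟩ := List.mem_map.mp hmmem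
      have : e ∈ rem.filter (fun x : Int × Int => x.1 == m) :=
        List.mem_filter.mpr ⟨he, by simp [hem]⟩
      rw [hC] at this; simp at this
    | cons t ctl =>
      have htC : t ∈ rem.filter (fun x : Int × Int => x.1 == m) := by rw [hC]; simp
      have ht_mem : t ∈ rem := (List.mem_filter.mp htC).1
      have ht1 : t.1 = m := by have := (List.mem_filter.mp htC).2; simpa using this
      have htptr : t.2 ≤ ptr := hnone t ht_mem ht1
      have hcmin : ∀ x ∈ rem, x.1 = m → t.2 ≤ x.2 := by
        intro x hx hx1
        have hxC : x ∈ rem.filter (fun x : Int × Int => x.1 == m) :=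
          List.mem_filter.mpr ⟨hx, by simp [hx1]⟩
        rw [hC] at hxC
        rcases List.mem_cons.mp hxC with rfl | hxC
        · exact le_refl _
        · have hpf : List.Pairwise (fun a b : Int × Int => a.2 < b.2) (t :: ctl) := by
            rw [← hC]; exact hasc.filter _
          exact le_of_lt (List.rel_of_pairwise_cons hpf hxC)
      have hstep := pvStepCase2 index L IH rem ptr heap count fa' fb' hlen hasc hsorted hperm hfa hfb
        m hh hnone t ht_mem ht1 htptr hcmin
      rw [hstep]
      have hgetD : (PySem.List.max? (((e₀ :: rest₀) : List (Int × Int)).map (fun x => x.1)) (fun x => x)).getD 0 = m := by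
        rw [hrem] at hm; rw [hm]; rfl
      rw [hrem] at hA hC ⊢
      rw [pvBLoop]
      simp only [hgetD, hA, hC]
      simp [List.headD]

-- building the heap by repeated heappush: sorted and a permutation of the pushed keys
lemma pvHeapBuild : ∀ (l : List (Int × Int)) (acc : List Int), acc.Pairwise (· ≤ ·) →
    (List.foldl (fun h (e : Int × Int) => pvInsSorted (-e.2) h) acc l).Pairwise (· ≤ ·) ∧
    (List.foldl (fun h (e : Int × Int) => pvInsSorted (-e.2) h) acc l).Perm (acc ++ l.map (fun e => -e.2)) := by
  intro l
  induction l with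
  | nil => intro acc h; exact ⟨h, by simp⟩
  | cons e l ih =>
    intro acc h
    have hs : (pvInsSorted (-e.2) acc).Pairwise (· ≤ ·) := by
      rw [pvInsSorted_eq]; exact List.Pairwise.orderedInsert _ _ h
    obtain ⟨h1, h2⟩ := ih (pvInsSorted (-e.2) acc) hs
    refine ⟨by simpa using h1, ?_⟩
    have hstep : (pvInsSorted (-e.2) acc).Perm (-e.2 :: acc) := by
      rw [pvInsSorted_eq]; exact List.perm_orderedInsert _ _ _
    have hA : (List.foldl (fun h (e : Int × Int) => pvInsSorted (-e.2) h) (pvInsSorted (-e.2) acc) l).Perm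
        ((-e.2 :: acc) ++ l.map (fun e => -e.2)) :=
      h2.trans (hstep.append_right _)
    simpa using hA.trans (List.perm_middle).symm

-- ===== VERDICT (by name: the statement is the Claim_ definition above) =====
theorem buyTicket_spec : Claim_equal_buyTicket := by
  unfold Claim_equal_buyTicket Spec_buyTicket
  intro priorities index _
  unfold buyTicket buyTicket_alt
  rw [PySem.List.foldl_prod_mk (fun s (e : Int × Int) => s ++ [(e.2, e.1)]) (fun h (e : Int × Int) => pvInsSorted (-e.2) h)]
  simp only [PySem.List.foldl_append_singleton_eq_map, List.nil_append]
  set rem₀ := (PySem.List.enumerate priorities).map (fun e => (e.2, e.1)) with hrem₀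
  have hpos : ∀ x ∈ rem₀, (0 : Int) ≤ x.2 := by
    intro x hx
    obtain ⟨e, he, rfl⟩ := List.mem_map.mp hx
    obtain ⟨k, hk, rfl⟩ := (PySem.List.mem_enumerate_iff _ _ _).mp he
    simp
  have hrot : pvRot (-1) rem₀ = rem₀ := by
    rw [pvRot]
    have h1 : rem₀.filter (fun e => decide ((-1 : Int) < e.2)) = rem₀ := by
      rw [List.filter_eq_self]; intro x hx; have := hpos x hx; simp; omega
    have h2 : rem₀.filter (fun e => decide (e.2 ≤ (-1 : Int))) = [] := by
      rw [List.filter_eq_nil_iff]; intro x hx; have := hpos x hx; simp; omega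
    rw [h1, h2, List.append_nil]
  have hasc : pvAsc rem₀ := by
    rw [hrem₀]
    exact List.Pairwise.map _ (fun a b hab => hab) (PySem.List.pairwise_lt_enumerate priorities 0)
  obtain ⟨hsorted, hperm⟩ := pvHeapBuild (PySem.List.enumerate priorities) [] (by simp)
  have hpermmap : (List.foldl (fun h (e : Int × Int) => pvInsSorted (-e.2) h) [] (PySem.List.enumerate priorities)).Perm
      (rem₀.map (fun e => -e.1)) := by
    refine hperm.trans ?_
    rw [hrem₀, List.map_map]
    have heq : List.map ((fun e : Int × Int => -e.1) ∘ fun e : Int × Int => (e.2, e.1)) (PySem.List.enumerate priorities)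
        = List.map (fun e : Int × Int => -e.2) (PySem.List.enumerate priorities) :=
      List.map_congr_left (fun a _ => rfl)
    rw [List.nil_append, heq]
  have hlen : rem₀.length = priorities.length := by
    rw [hrem₀, List.length_map, PySem.List.length_enumerate]
  have hfa : priorities.length * priorities.length + 1 ≤ (priorities.length + 1) * (priorities.length + 1) := by
    have : (priorities.length + 1) * (priorities.length + 1)
        = priorities.length * priorities.length + 2 * priorities.length + 1 := by ring
    omega
  conv_lhs => rw [← hrot]
  exact pvMain index priorities.length rem₀ (-1)
    (List.foldl (fun h (e : Int × Int) => pvInsSorted (-e.2) h) [] (PySem.List.enumerate priorities))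
    0 ((priorities.length + 1) * (priorities.length + 1)) (priorities.length + 1)
    hlen hasc hsorted hpermmap hfa (by omega)
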